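-- pv_equiv track=rewrite | github.com/ev3rlit/CoTe | DFS/체육대회/solution.py | solution
-- ===== SOURCE A (Python) =====
-- def solution(ability):
--
--     students = len(ability)
--     sports = len(ability[0])
--     visited = [False] * students
--     max_ability = [0]
--
--     def dfs(depth, current_sum):
--         if depth == sports:
--             max_ability[0] = max(max_ability[0], current_sum)
--             return
--
--         for i in range(students):
--             if visited[i]:
--                 continue
--
--             visited[i] = True
--             dfs(depth+1, current_sum + ability[i][depth])
--             visited[i] = False
--
--     dfs(0,0)
--
--     return max_ability[0]
-- ===== SOURCE B (Python) =====
-- def solution(ability):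
--     n = len(ability)
--     k = len(ability[0])
--     # layered bitmask DP: after j rounds, dp maps each set of j used students
--     # to the best total for sports 0..j-1
--     dp = {0: 0}
--     for j in range(k):
--         ndp = {}
--         for mask, s in dp.items():
--             for i in range(n):
--                 if not mask >> i & 1:
--                     m2 = mask | (1 << i)
--                     v = s + ability[i][j]
--                     w = ndp.get(m2)
--                     if w is None or v > w:
--                         ndp[m2] = v
--         dp = ndp
--     best = 0
--     for s in dp.values():
--         best = max(best, s)
--     return best
-- ===== Notes on version B (the rewrite author's own statement) =====
-- stated objective: faster
-- what changed: Replaces the factorial depth-first enumeration of all student permutations (backtracking over a visited array with a global max) by a layered bitmask dynamic program: one dict per sport mapping each set of used students to the best total so far, so branches reaching the same student set are merged.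
import Mathlib
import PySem

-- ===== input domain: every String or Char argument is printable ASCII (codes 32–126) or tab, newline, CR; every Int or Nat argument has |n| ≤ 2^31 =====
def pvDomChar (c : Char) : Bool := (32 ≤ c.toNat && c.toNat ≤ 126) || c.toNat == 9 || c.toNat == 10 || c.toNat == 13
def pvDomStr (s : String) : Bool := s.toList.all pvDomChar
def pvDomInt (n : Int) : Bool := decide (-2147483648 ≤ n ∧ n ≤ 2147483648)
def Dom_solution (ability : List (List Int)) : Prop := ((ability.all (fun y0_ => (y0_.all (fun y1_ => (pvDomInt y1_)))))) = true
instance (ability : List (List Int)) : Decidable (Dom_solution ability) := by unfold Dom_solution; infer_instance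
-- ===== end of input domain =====

-- B replaces A's factorial depth-first search over all student permutations by a layered
-- bitmask dynamic program over sets of used students (objective: faster, asymptotically).

-- ===== PORT A =====
-- ability[i][depth]: inside Pre_solution every access is in range, so getD is exact there
def pvAbil (ability : List (List Int)) (i d : Nat) : Int := (ability.getD i []).getD d 0

-- the nested dfs; the Python recursion is bounded by rem = sports - depth, carried as fuel
-- (the `0` fuel branch is never reached from the initial call rem = sports, depth = 0);
-- state st = (visited, max_ability[0]) is threaded exactly as the Python mutates it
def pvDfs (ability : List (List Int)) (students sports : Nat) :
    Nat → Nat → Int → List Bool × Int → List Bool × Int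
  | rem, depth, cur, st =>
    if depth = sports then (st.1, max st.2 cur)
    else
      match rem with
      | 0 => st
      | r + 1 =>
        (List.range students).foldl (fun st i =>
          if st.1.getD i false then st
          else
            let st2 := pvDfs ability students sports r (depth + 1)
              (cur + pvAbil ability i depth) (st.1.set i true, st.2)
            (st2.1.set i false, st2.2)) st

def solution (ability : List (List Int)) : Int :=
  let students := ability.length
  let sports := (ability.headD []).length
  (pvDfs ability students sports sports 0 0 (List.replicate students false, 0)).2

-- ===== PORT B =====
-- `w = ndp.get(m2); if w is None or v > w: ndp[m2] = v`
def pvIns (ndp : PySem.Dict Nat Int) (m2 : Nat) (v : Int) : PySem.Dict Nat Int :=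
  match ndp.get? m2 with
  | none => ndp.insert m2 v
  | some w => if v > w then ndp.insert m2 v else ndp

-- one round of the j-loop body: build ndp from dp.items
def pvLayer (ability : List (List Int)) (n j : Nat) (dp : PySem.Dict Nat Int) :
    PySem.Dict Nat Int :=
  dp.items.foldl (fun ndp ms =>
    (List.range n).foldl (fun ndp i =>
      if (ms.1 >>> i) &&& 1 == 0 then
        pvIns ndp (ms.1 ||| (1 <<< i)) (ms.2 + pvAbil ability i j)
      else ndp) ndp) PySem.Dict.empty

def solution_alt (ability : List (List Int)) : Int :=
  let n := ability.length
  let k := (ability.headD []).length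
  let dp := (List.range k).foldl (fun dp j => pvLayer ability n j dp)
    (PySem.Dict.empty.insert 0 0)
  dp.values.foldl (fun best s => max best s) 0

-- ===== PRECONDITION & SPEC =====
-- Pre_ excludes exactly the inputs on which the Python A raises: IndexError on `ability[0]`
-- for the empty list, and IndexError on `ability[i][depth]` when some row is shorter than
-- min(sports, students) (every row is indexed at every depth below that bound).
def Pre_solution (ability : List (List Int)) : Prop :=
  ability ≠ [] ∧
    ∀ row ∈ ability, min ((ability.headD []).length) ability.length ≤ row.length
instance (ability : List (List Int)) : Decidable (Pre_solution ability) := by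
  unfold Pre_solution; infer_instance

def pvWitness_solution : List (List Int) := [[1, 2], [3, 4]]

def Spec_solution (ability : List (List Int)) (out : Int) : Prop := out = solution_alt ability
instance (ability : List (List Int)) (out : Int) : Decidable (Spec_solution ability out) := by
  unfold Spec_solution; infer_instance

-- ===== CLAIM (what is proved, stated in full; the proofs are below) =====
def Claim_equal_solution : Prop := ∀ (ability : List (List Int)), Dom_solution ability → Pre_solution ability → Spec_solution ability (solution ability)

-- ===== LEMMAS AND PROOFS =====

-- option-valued maximum (max over an empty candidate set = none)
def pvOmax : Option Int → Option Int → Option Int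
  | none, b => b
  | some x, none => some x
  | some x, some y => some (max x y)

def pvFold {α : Type} (h : α → Option Int) (l : List α) : Option Int :=
  l.foldl (fun a x => pvOmax a (h x)) none

-- how A folds a candidate best `o` into accumulator m given prefix sum cur
def pvApp (m cur : Int) : Option Int → Int
  | none => m
  | some e => max m (cur + e)

-- the common mathematical core: best completion for sports depth..k-1 avoiding `mask`
def pvF (ability : List (List Int)) (n k : Nat) : Nat → Nat → Nat → Option Int
  | r, depth, mask =>
    if depth = k then some 0
    else
      match r with
      | 0 => none
      | r + 1 =>
        pvFold (fun i =>
          if mask.testBit i then none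
          else (pvF ability n k r (depth + 1) (mask ||| (1 <<< i))).map
            (fun e => pvAbil ability i depth + e)) (List.range n)

def maskOf (v : List Bool) : Nat := v.foldr (fun b m => (if b then 1 else 0) + 2 * m) 0

def pvH (ability : List (List Int)) (n k : Nat) (dp : PySem.Dict Nat Int) (r d m : Nat) :
    Option Int :=
  match dp.get? m with
  | none => none
  | some s => (pvF ability n k r d m).map (fun e => s + e)

theorem pvOmax_none_right (a : Option Int) : pvOmax a none = a := by
  cases a <;> rfl

theorem pvOmax_assoc (a b c : Option Int) : pvOmax (pvOmax a b) c = pvOmax a (pvOmax b c) := by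
  cases a <;> cases b <;> cases c <;> simp [pvOmax, max_assoc]

theorem pvOmax_comm (a b : Option Int) : pvOmax a b = pvOmax b a := by
  cases a <;> cases b <;> simp [pvOmax, max_comm]

theorem pvOmax_right_comm (a b c : Option Int) :
    pvOmax (pvOmax a b) c = pvOmax (pvOmax a c) b := by
  rw [pvOmax_assoc, pvOmax_assoc, pvOmax_comm b c]

theorem pvOmax_map_add (s : Int) (a b : Option Int) :
    (pvOmax a b).map (fun e => s + e) = pvOmax (a.map (fun e => s + e)) (b.map (fun e => s + e)) := by
  cases a <;> cases b <;> simp [pvOmax, max_add_add_left]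

theorem pvApp_shift (m c a : Int) (o : Option Int) :
    pvApp m (c + a) o = pvApp m c (o.map (fun e => a + e)) := by
  cases o <;> simp [pvApp, add_assoc]

theorem pvApp_omax (m c : Int) (o1 o2 : Option Int) :
    pvApp (pvApp m c o1) c o2 = pvApp m c (pvOmax o1 o2) := by
  cases o1 <;> cases o2 <;> simp [pvApp, pvOmax, max_add_add_left, max_assoc]

theorem pvFold_hom {α : Type} (h : α → Option Int) (l : List α) (acc : Option Int) :
    l.foldl (fun a x => pvOmax a (h x)) acc = pvOmax acc (pvFold h l) := by
  induction l generalizing acc with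
  | nil => simp [pvFold, pvOmax_none_right]
  | cons x l ih =>
    simp only [pvFold, List.foldl_cons] at *
    rw [ih, ih (pvOmax none (h x)), ← pvOmax_assoc]
    rfl

theorem pvFold_cons {α : Type} (h : α → Option Int) (x : α) (l : List α) :
    pvFold h (x :: l) = pvOmax (h x) (pvFold h l) := by
  simp only [pvFold, List.foldl_cons]
  rw [pvFold_hom]
  rfl

theorem pvFold_congr {α : Type} (h h' : α → Option Int) (l : List α)
    (he : ∀ x ∈ l, h x = h' x) : pvFold h l = pvFold h' l := by
  induction l with
  | nil => rfl
  | cons x l ih =>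
    rw [pvFold_cons, pvFold_cons, he x (by simp), ih (fun x hx => he x (by simp [hx]))]

theorem pvFold_none {α : Type} (h : α → Option Int) (l : List α)
    (he : ∀ x ∈ l, h x = none) : pvFold h l = none := by
  induction l with
  | nil => rfl
  | cons x l ih =>
    rw [pvFold_cons, he x (by simp), ih (fun x hx => he x (by simp [hx]))]
    rfl

theorem pvFold_append {α : Type} (h : α → Option Int) (l1 l2 : List α) :
    pvFold h (l1 ++ l2) = pvOmax (pvFold h l1) (pvFold h l2) := by
  simp only [pvFold, List.foldl_append]
  rw [pvFold_hom]
  rfl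

theorem pvFold_map {α : Type} (s : Int) (h : α → Option Int) (l : List α) :
    (pvFold h l).map (fun e => s + e) = pvFold (fun x => (h x).map (fun e => s + e)) l := by
  induction l with
  | nil => rfl
  | cons x l ih => rw [pvFold_cons, pvFold_cons, pvOmax_map_add, ih]

theorem pvFold_map_list {α β : Type} (h : β → Option Int) (f : α → β) (l : List α) :
    pvFold h (l.map f) = pvFold (fun x => h (f x)) l := by
  simp only [pvFold, List.foldl_map]

theorem pvFold_update {α : Type} [DecidableEq α] (h : α → Option Int) (l : List α)
    (hl : l.Nodup) (m : α) (hm : m ∈ l) (x : Option Int) :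
    pvFold (fun i => if i = m then pvOmax (h i) x else h i) l = pvOmax (pvFold h l) x := by
  induction l with
  | nil => cases hm
  | cons y l ih =>
    rw [pvFold_cons, pvFold_cons]
    rcases List.mem_cons.mp hm with rfl | hm'
    · have hnot : m ∉ l := (List.nodup_cons.mp hl).1
      rw [if_pos rfl, pvFold_congr _ h l (fun i hi => if_neg (fun (hh : i = m) => hnot (hh ▸ hi)))]
      rw [pvOmax_comm (h m) x, pvOmax_assoc]
      exact pvOmax_comm _ _
    · have hy : y ≠ m := by rintro rfl; exact (List.nodup_cons.mp hl).1 hm'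
      rw [if_neg hy, ih (List.nodup_cons.mp hl).2 hm', ← pvOmax_assoc]

theorem pvFold_perm {α : Type} (h : α → Option Int) (l l' : List α) (hp : l.Perm l') :
    pvFold h l = pvFold h l' := by
  have : RightCommutative (fun (a : Option Int) (x : α) => pvOmax a (h x)) :=
    ⟨fun a x y => pvOmax_right_comm a (h x) (h y)⟩
  exact hp.foldl_eq none

theorem pvFold_single {α : Type} [DecidableEq α] (l : List α) (hl : l.Nodup) (m : α)
    (hm : m ∈ l) (x : Option Int) :
    pvFold (fun i => if i = m then x else none) l = x := by
  have := pvFold_update (fun _ => none) l hl m hm x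
  simpa [pvFold_none (fun _ => (none : Option Int)) l (fun _ _ => rfl), pvOmax] using this

-- maskOf bridges A's visited list to bitmasks
theorem testBit_maskOf (v : List Bool) (i : Nat) : (maskOf v).testBit i = v.getD i false := by
  induction v generalizing i with
  | nil => simp [maskOf]
  | cons b t ih =>
    cases i with
    | zero =>
      have hm : maskOf (b :: t) = (if b then 1 else 0) + 2 * maskOf t := rfl
      rw [hm]
      cases b <;> simp [Nat.testBit_zero, Nat.add_mul_mod_self_left]
    | succ i =>
      have : maskOf (b :: t) = (if b then 1 else 0) + 2 * maskOf t := rfl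
      rw [this, Nat.testBit_succ]
      have h2 : ((if b then 1 else 0) + 2 * maskOf t) / 2 = maskOf t := by
        cases b <;> simp <;> omega
      rw [h2, ih]
      rfl

theorem maskOf_replicate (n : Nat) : maskOf (List.replicate n false) = 0 := by
  induction n with
  | zero => rfl
  | succ n ih => simp [List.replicate_succ, maskOf] at *; omega

theorem maskOf_set (v : List Bool) (i : Nat) (hi : i < v.length) :
    maskOf (v.set i true) = maskOf v ||| (1 <<< i) := by
  apply Nat.eq_of_testBit_eq
  intro j
  rw [Nat.testBit_or, testBit_maskOf, testBit_maskOf]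
  have h1 : (1 : Nat) <<< i = 2 ^ i := by rw [Nat.shiftLeft_eq, one_mul]
  rw [h1, Nat.testBit_two_pow]
  by_cases hji : j = i
  · subst hji
    simp [List.getD, hi]
  · simp [List.getD, List.getElem?_set_ne (fun h => hji h.symm)]
    exact fun h => absurd h.symm hji

theorem set_false_of_getD (v : List Bool) (i : Nat) (h : v.getD i false = false) :
    v.set i false = v := by
  induction v generalizing i with
  | nil => rfl
  | cons b t ih =>
    cases i with
    | zero => simp [List.getD] at h; simp [h]
    | succ i => simp [List.getD] at h ⊢; exact ih i (by simpa [List.getD] using h)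

-- A's dfs computes pvApp of pvF
theorem pvDfs_eq (ability : List (List Int)) (n k : Nat) :
    ∀ (r depth : Nat) (cur : Int) (v : List Bool) (mx : Int), v.length = n →
      pvDfs ability n k r depth cur (v, mx) =
        (v, pvApp mx cur (pvF ability n k r depth (maskOf v))) := by
  intro r
  induction r with
  | zero =>
    intro depth cur v mx hv
    rw [pvDfs, pvF]
    by_cases hd : depth = k
    · simp [hd, pvApp]
    · simp [hd, pvApp]
  | succ r ih =>
    intro depth cur v mx hv
    rw [pvDfs, pvF]
    by_cases hd : depth = k
    · simp [hd, pvApp]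
    · simp only [if_neg hd]
      suffices haux : ∀ (l : List Nat), (∀ i ∈ l, i < n) → ∀ (mx : Int),
          l.foldl (fun st i =>
            if st.1.getD i false then st
            else
              let st2 := pvDfs ability n k r (depth + 1)
                (cur + pvAbil ability i depth) (st.1.set i true, st.2)
              (st2.1.set i false, st2.2)) (v, mx) =
            (v, pvApp mx cur (pvFold (fun i =>
              if (maskOf v).testBit i then none
              else (pvF ability n k r (depth + 1) ((maskOf v) ||| (1 <<< i))).map
                (fun e => pvAbil ability i depth + e)) l)) by
        exact haux (List.range n) (fun i hi => List.mem_range.mp hi) mx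
      intro l hli
      induction l with
      | nil => intro mx; simp [pvFold, pvApp]
      | cons i t iht =>
        intro mx
        have hmem : ∀ x ∈ t, x < n := fun x hx => hli x (by simp [hx])
        have hin : i < n := hli i (by simp)
        have hiv : i < v.length := hv ▸ hin
        rw [List.foldl_cons, pvFold_cons]
        by_cases hvi : v.getD i false = true
        · have hbit : (maskOf v).testBit i = true := by rw [testBit_maskOf]; exact hvi
          have hstep : (if (v, mx).1.getD i false then (v, mx)
              else
                let st2 := pvDfs ability n k r (depth + 1)
                  (cur + pvAbil ability i depth) ((v, mx).1.set i true, (v, mx).2)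
                (st2.1.set i false, st2.2)) = (v, mx) := by
            simp only [hvi, if_true]
          rw [hstep, iht hmem mx, hbit]
          rfl
        · have hvi' : v.getD i false = false := by simpa using hvi
          have hbit : (maskOf v).testBit i = false := by rw [testBit_maskOf]; exact hvi'
          have hlen : (v.set i true).length = n := by simpa using hv
          have hstep : (if (v, mx).1.getD i false then (v, mx)
              else
                let st2 := pvDfs ability n k r (depth + 1)
                  (cur + pvAbil ability i depth) ((v, mx).1.set i true, (v, mx).2)
                (st2.1.set i false, st2.2)) =
              (v, pvApp mx cur ((pvF ability n k r (depth + 1) (maskOf v ||| (1 <<< i))).map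
                (fun e => pvAbil ability i depth + e))) := by
            simp only [hvi', Bool.false_eq_true, if_false]
            rw [ih (depth + 1) (cur + pvAbil ability i depth) (v.set i true) mx hlen]
            simp only [List.set_set]
            rw [set_false_of_getD v i hvi', maskOf_set v i hiv, pvApp_shift]
          rw [hstep, hbit]
          simp only [Bool.false_eq_true, if_false]
          rw [iht hmem, pvApp_omax]

-- B-side: pvIns updates the range-fold pointwise
theorem pvFold_pvIns (ability : List (List Int)) (n k : Nat) (ndp : PySem.Dict Nat Int)
    (r d m2 : Nat) (v : Int) (hm2 : m2 < 2 ^ n) :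
    pvFold (pvH ability n k (pvIns ndp m2 v) r d) (List.range (2 ^ n)) =
      pvOmax (pvFold (pvH ability n k ndp r d) (List.range (2 ^ n)))
        ((pvF ability n k r d m2).map (fun e => v + e)) := by
  have hpoint : ∀ m', pvH ability n k (pvIns ndp m2 v) r d m' =
      if m' = m2 then pvOmax (pvH ability n k ndp r d m')
        ((pvF ability n k r d m2).map (fun e => v + e))
      else pvH ability n k ndp r d m' := by
    intro m'
    unfold pvH pvIns
    cases hg : ndp.get? m2 with
    | none =>
      simp only [hg]
      rw [PySem.Dict.get?_insert]
      by_cases hm' : m' = m2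
      · subst hm'; simp [pvOmax, hg]
      · simp only [if_neg hm']
    | some w =>
      simp only [hg]
      by_cases hvw : v > w
      · rw [if_pos hvw, PySem.Dict.get?_insert]
        by_cases hm' : m' = m2
        · subst hm'
          simp only [hg]
          cases pvF ability n k r d m' with
          | none => rfl
          | some e =>
            simp only [if_true, Option.map_some, pvOmax, Option.some.injEq]
            have h1 : w + e ≤ v + e := by omega
            exact (max_eq_right h1).symm
        · simp only [if_neg hm']
      · rw [if_neg hvw]
        by_cases hm' : m' = m2
        · subst hm'
          simp only [hg]
          cases pvF ability n k r d m' with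
          | none => rfl
          | some e =>
            simp only [if_true, Option.map_some, pvOmax, Option.some.injEq]
            have h1 : v + e ≤ w + e := by omega
            exact (max_eq_left h1).symm
        · simp only [if_neg hm']
  rw [pvFold_congr _ _ _ (fun m' _ => hpoint m')]
  exact pvFold_update (pvH ability n k ndp r d) _ List.nodup_range m2 (List.mem_range.mpr hm2) _

theorem mem_keys_pvIns (ndp : PySem.Dict Nat Int) (m2 key : Nat) (v : Int)
    (h : key ∈ (pvIns ndp m2 v).keys) : key = m2 ∨ key ∈ ndp.keys := by
  unfold pvIns at h
  cases hg : ndp.get? m2 with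
  | none => simp only [hg] at h; exact (PySem.Dict.mem_keys_insert _ _ _ _).mp h
  | some w =>
    simp only [hg] at h
    by_cases hv : v > w
    · rw [if_pos hv] at h; exact (PySem.Dict.mem_keys_insert _ _ _ _).mp h
    · rw [if_neg hv] at h; exact Or.inr h

theorem nodup_keys_pvIns (ndp : PySem.Dict Nat Int) (m2 : Nat) (v : Int)
    (h : ndp.keys.Nodup) : (pvIns ndp m2 v).keys.Nodup := by
  unfold pvIns
  cases hg : ndp.get? m2 with
  | none => exact PySem.Dict.nodup_keys_insert _ _ _ h
  | some w =>
    by_cases hv : v > w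
    · simp only [if_pos hv]; exact PySem.Dict.nodup_keys_insert _ _ _ h
    · simp only [if_neg hv]; exact h

theorem pvBit (m i : Nat) : ((m >>> i) &&& 1 == 0) = !(m.testBit i) := by
  rcases Nat.mod_two_eq_zero_or_one (m >>> i) with h | h <;>
    simp [Nat.testBit, Nat.and_one_is_mod, Nat.one_and_eq_mod_two, h]

-- the inner loop over students
theorem pvFold_inner (ability : List (List Int)) (n k : Nat) (r d j m : Nat) (s : Int)
    (hm : m < 2 ^ n) :
    ∀ (l : List Nat), (∀ i ∈ l, i < n) → ∀ (ndp : PySem.Dict Nat Int),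
      pvFold (pvH ability n k
        (l.foldl (fun ndp i =>
          if (m >>> i) &&& 1 == 0 then
            pvIns ndp (m ||| (1 <<< i)) (s + pvAbil ability i j)
          else ndp) ndp) r d) (List.range (2 ^ n)) =
      pvOmax (pvFold (pvH ability n k ndp r d) (List.range (2 ^ n)))
        (pvFold (fun i =>
          if m.testBit i then none
          else (pvF ability n k r d (m ||| (1 <<< i))).map
            (fun e => (s + pvAbil ability i j) + e)) l) := by
  intro l
  induction l with
  | nil => intro _ ndp; simp [pvFold, pvOmax_none_right]
  | cons i t iht =>
    intro hli ndp
    have hin : i < n := hli i (by simp)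
    rw [List.foldl_cons, pvFold_cons]
    by_cases hb : m.testBit i
    · have hg : ((m >>> i) &&& 1 == 0) = false := by rw [pvBit, hb]; rfl
      rw [hg]
      simp only [Bool.false_eq_true, if_false, if_pos hb]
      rw [iht (fun x hx => hli x (by simp [hx])) ndp]
      rfl
    · have hbf : m.testBit i = false := by simpa using hb
      have hg : ((m >>> i) &&& 1 == 0) = true := by rw [pvBit, hbf]; rfl
      rw [hg]
      simp only [if_true, hbf, Bool.false_eq_true, if_false]
      rw [iht (fun x hx => hli x (by simp [hx]))]
      rw [pvFold_pvIns ability n k ndp r d (m ||| (1 <<< i)) (s + pvAbil ability i j)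
        (Nat.or_lt_two_pow hm (by
          rw [Nat.shiftLeft_eq, one_mul]
          exact Nat.pow_lt_pow_right (by omega) hin))]
      rw [pvOmax_assoc, pvOmax_comm ((pvF ability n k r d (m ||| (1 <<< i))).map
        (fun e => s + pvAbil ability i j + e))]

-- the loop over dp.items
theorem pvFold_outer (ability : List (List Int)) (n k : Nat) (r d j : Nat) :
    ∀ (L : List (Nat × Int)), (∀ p ∈ L, p.1 < 2 ^ n) → ∀ (ndp : PySem.Dict Nat Int),
      pvFold (pvH ability n k
        (L.foldl (fun ndp ms =>
          (List.range n).foldl (fun ndp i =>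
            if (ms.1 >>> i) &&& 1 == 0 then
              pvIns ndp (ms.1 ||| (1 <<< i)) (ms.2 + pvAbil ability i j)
            else ndp) ndp) ndp) r d) (List.range (2 ^ n)) =
      pvOmax (pvFold (pvH ability n k ndp r d) (List.range (2 ^ n)))
        (pvFold (fun p =>
          pvFold (fun i =>
            if p.1.testBit i then none
            else (pvF ability n k r d (p.1 ||| (1 <<< i))).map
              (fun e => (p.2 + pvAbil ability i j) + e)) (List.range n)) L) := by
  intro L
  induction L with
  | nil => intro _ ndp; simp [pvFold, pvOmax_none_right]
  | cons p t iht =>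
    intro hL ndp
    rw [List.foldl_cons, pvFold_cons]
    rw [iht (fun q hq => hL q (by simp [hq]))]
    rw [pvFold_inner ability n k r d j p.1 p.2 (hL p (by simp)) (List.range n)
      (fun i hi => List.mem_range.mp hi) ndp]
    rw [pvOmax_assoc]

-- fold over a dict's range-indexed contributions = fold over its items
theorem pvFold_items (ability : List (List Int)) (n k : Nat) (dp : PySem.Dict Nat Int)
    (r d : Nat) (hnd : dp.keys.Nodup) (hb : ∀ key ∈ dp.keys, key < 2 ^ n) :
    pvFold (pvH ability n k dp r d) (List.range (2 ^ n)) =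
      pvFold (fun p => (pvF ability n k r d p.1).map (fun e => p.2 + e)) dp.items := by
  have hsub : ∀ key ∈ dp.keys, key ∈ List.range (2 ^ n) :=
    fun key hk => List.mem_range.mpr (hb key hk)
  have hperm1 : ((List.range (2 ^ n)).filter (fun m => decide (m ∈ dp.keys)) ++
      (List.range (2 ^ n)).filter (fun m => !decide (m ∈ dp.keys))).Perm
      (List.range (2 ^ n)) := List.filter_append_perm _ _
  have hperm2 : ((List.range (2 ^ n)).filter (fun m => decide (m ∈ dp.keys))).Perm dp.keys := by
    rw [List.perm_ext_iff_of_nodup (List.Nodup.filter _ List.nodup_range) hnd]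
    intro a
    simp only [List.mem_filter, decide_eq_true_eq]
    exact ⟨fun h => h.2, fun h => ⟨hsub a h, h⟩⟩
  have h1 : pvFold (pvH ability n k dp r d) (List.range (2 ^ n)) =
      pvFold (pvH ability n k dp r d) dp.keys := by
    rw [← pvFold_perm _ _ _ hperm1, pvFold_append]
    rw [pvFold_perm _ _ _ hperm2]
    rw [pvFold_none (pvH ability n k dp r d)
      ((List.range (2 ^ n)).filter (fun m => !decide (m ∈ dp.keys)))
      (fun m hm => by
        have : m ∉ dp.keys := by
          have := (List.mem_filter.mp hm).2
          simpa using this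
        unfold pvH
        rw [(PySem.Dict.get?_eq_none_iff_not_mem_keys dp m).mpr this])]
    exact pvOmax_none_right _
  rw [h1, PySem.Dict.items_eq_map_keys dp hnd 0, pvFold_map_list]
  apply pvFold_congr
  intro key hk
  unfold pvH
  have hc : dp.contains key = true := (PySem.Dict.contains_iff_mem_keys dp key).mpr hk
  have hs : (dp.get? key).isSome := by rw [← PySem.Dict.contains_eq_isSome_get?]; exact hc
  obtain ⟨s, hg⟩ := Option.isSome_iff_exists.mp hs
  rw [hg, PySem.Dict.getD_eq_get?_getD, hg]
  rfl

-- keys produced by one layer are bounded and Nodup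
theorem keys_pvLayer (ability : List (List Int)) (n j : Nat) (dp : PySem.Dict Nat Int)
    (hb : ∀ key ∈ dp.keys, key < 2 ^ n) :
    (∀ key ∈ (pvLayer ability n j dp).keys, key < 2 ^ n) ∧
      (pvLayer ability n j dp).keys.Nodup := by
  have hinner : ∀ (m : Nat) (s : Int), m < 2 ^ n → ∀ (l : List Nat), (∀ i ∈ l, i < n) →
      ∀ (ndp : PySem.Dict Nat Int), (∀ key ∈ ndp.keys, key < 2 ^ n) → ndp.keys.Nodup →
      (∀ key ∈ (l.foldl (fun ndp i =>
        if (m >>> i) &&& 1 == 0 then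
          pvIns ndp (m ||| (1 <<< i)) (s + pvAbil ability i j)
        else ndp) ndp).keys, key < 2 ^ n) ∧
      (l.foldl (fun ndp i =>
        if (m >>> i) &&& 1 == 0 then
          pvIns ndp (m ||| (1 <<< i)) (s + pvAbil ability i j)
        else ndp) ndp).keys.Nodup := by
    intro m s hm l
    induction l with
    | nil => intro _ ndp h1 h2; exact ⟨h1, h2⟩
    | cons i t iht =>
      intro hli ndp h1 h2
      have hin : i < n := hli i (by simp)
      rw [List.foldl_cons]
      by_cases hgd : ((m >>> i) &&& 1 == 0) = true
      · rw [if_pos hgd]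
        apply iht (fun x hx => hli x (by simp [hx]))
        · intro key hk
          rcases mem_keys_pvIns _ _ _ _ hk with rfl | hk'
          · exact Nat.or_lt_two_pow hm (by
              rw [Nat.shiftLeft_eq, one_mul]
              exact Nat.pow_lt_pow_right (by omega) hin)
          · exact h1 key hk'
        · exact nodup_keys_pvIns _ _ _ h2
      · rw [if_neg hgd]
        exact iht (fun x hx => hli x (by simp [hx])) ndp h1 h2
  have houter : ∀ (L : List (Nat × Int)), (∀ p ∈ L, p.1 < 2 ^ n) →
      ∀ (ndp : PySem.Dict Nat Int), (∀ key ∈ ndp.keys, key < 2 ^ n) → ndp.keys.Nodup →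
      (∀ key ∈ (L.foldl (fun ndp ms =>
        (List.range n).foldl (fun ndp i =>
          if (ms.1 >>> i) &&& 1 == 0 then
            pvIns ndp (ms.1 ||| (1 <<< i)) (ms.2 + pvAbil ability i j)
          else ndp) ndp) ndp).keys, key < 2 ^ n) ∧
      (L.foldl (fun ndp ms =>
        (List.range n).foldl (fun ndp i =>
          if (ms.1 >>> i) &&& 1 == 0 then
            pvIns ndp (ms.1 ||| (1 <<< i)) (ms.2 + pvAbil ability i j)
          else ndp) ndp) ndp).keys.Nodup := by
    intro L
    induction L with
    | nil => intro _ ndp h1 h2; exact ⟨h1, h2⟩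
    | cons p t iht =>
      intro hL ndp h1 h2
      rw [List.foldl_cons]
      obtain ⟨g1, g2⟩ := hinner p.1 p.2 (hL p (by simp)) (List.range n)
        (fun i hi => List.mem_range.mp hi) ndp h1 h2
      exact iht (fun q hq => hL q (by simp [hq])) _ g1 g2
  unfold pvLayer
  exact houter dp.items
    (fun p hp => hb p.1 (PySem.Dict.mem_keys_of_mem_items dp hp))
    PySem.Dict.empty
    (by intro key hk; rw [PySem.Dict.keys_empty] at hk; cases hk)
    (by rw [PySem.Dict.keys_empty]; exact List.nodup_nil)

-- one layer preserves the overall optimum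
theorem pvLayer_eq (ability : List (List Int)) (n k : Nat) (j r : Nat) (hjk : j ≠ k)
    (dp : PySem.Dict Nat Int) (hnd : dp.keys.Nodup) (hb : ∀ key ∈ dp.keys, key < 2 ^ n) :
    pvFold (pvH ability n k (pvLayer ability n j dp) r (j + 1)) (List.range (2 ^ n)) =
      pvFold (pvH ability n k dp (r + 1) j) (List.range (2 ^ n)) := by
  have hItems : ∀ p ∈ dp.items, p.1 < 2 ^ n :=
    fun p hp => hb p.1 (PySem.Dict.mem_keys_of_mem_items dp hp)
  unfold pvLayer
  rw [pvFold_outer ability n k r (j + 1) j dp.items hItems PySem.Dict.empty]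
  rw [pvFold_none (pvH ability n k PySem.Dict.empty r (j + 1)) _ (fun m _ => by
    unfold pvH; rw [PySem.Dict.get?_empty])]
  rw [pvFold_items ability n k dp (r + 1) j hnd hb]
  rw [show ∀ x : Option Int, pvOmax none x = x from fun _ => rfl]
  apply pvFold_congr
  intro p _
  have hF : (pvF ability n k (r + 1) j p.1).map (fun e => p.2 + e) =
      pvFold (fun i => if p.1.testBit i then none
        else (pvF ability n k r (j + 1) (p.1 ||| (1 <<< i))).map
          (fun e => (p.2 + pvAbil ability i j) + e)) (List.range n) := by
    conv_lhs => rw [pvF]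
    rw [if_neg hjk, pvFold_map]
    apply pvFold_congr
    intro i _
    by_cases hbit : p.1.testBit i
    · simp [hbit]
    · simp only [hbit, Bool.false_eq_true, if_false]
      cases pvF ability n k r (j + 1) (p.1 ||| (1 <<< i)) with
      | none => rfl
      | some e => simp [add_assoc]
  rw [hF]

-- the invariant carried through the j-loop
theorem pvLayers (ability : List (List Int)) (n k : Nat) :
    ∀ a, a ≤ k →
      (∀ key ∈ ((List.range a).foldl (fun dp j => pvLayer ability n j dp)
        (PySem.Dict.empty.insert 0 0)).keys, key < 2 ^ n) ∧
      ((List.range a).foldl (fun dp j => pvLayer ability n j dp)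
        (PySem.Dict.empty.insert 0 0)).keys.Nodup ∧
      pvFold (pvH ability n k ((List.range a).foldl (fun dp j => pvLayer ability n j dp)
          (PySem.Dict.empty.insert 0 0)) (k - a) a) (List.range (2 ^ n)) =
        pvF ability n k k 0 0 := by
  intro a
  induction a with
  | zero =>
    intro _
    refine ⟨?_, ?_, ?_⟩
    · intro key hk
      rcases (PySem.Dict.mem_keys_insert _ _ _ _).mp (by simpa using hk) with rfl | hk'
      · exact Nat.two_pow_pos n
      · rw [PySem.Dict.keys_empty] at hk'; cases hk'
    · exact PySem.Dict.nodup_keys_insert _ _ _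
        (by rw [PySem.Dict.keys_empty]; exact List.nodup_nil)
    · have hpoint : ∀ m, pvH ability n k (PySem.Dict.empty.insert 0 0) (k - 0) 0 m =
          if m = 0 then pvF ability n k k 0 0 else none := by
        intro m
        unfold pvH
        rw [PySem.Dict.get?_insert]
        by_cases hm : m = 0
        · subst hm
          simp only [Nat.sub_zero]
          cases pvF ability n k k 0 0 with
          | none => rfl
          | some e => simp
        · simp only [if_neg hm, PySem.Dict.get?_empty]
      simp only [List.range_zero, List.foldl_nil]
      rw [pvFold_congr _ _ _ (fun m _ => hpoint m)]
      exact pvFold_single _ List.nodup_range 0 (List.mem_range.mpr (Nat.two_pow_pos n)) _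
  | succ a ih =>
    intro hak
    obtain ⟨hbound, hnodup, hOE⟩ := ih (by omega)
    rw [List.range_succ, List.foldl_append, List.foldl_cons, List.foldl_nil]
    obtain ⟨hbound', hnodup'⟩ := keys_pvLayer ability n a _ hbound
    refine ⟨hbound', hnodup', ?_⟩
    have hsub : k - a = (k - (a + 1)) + 1 := by omega
    rw [hsub] at hOE
    rw [pvLayer_eq ability n k a (k - (a + 1)) (by omega) _ hnodup hbound]
    exact hOE

theorem pvApp_max (z x : Int) (o : Option Int) :
    pvApp (max z x) 0 o = pvApp z 0 (pvOmax (some x) o) := by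
  cases o <;> simp [pvApp, pvOmax, max_assoc]

theorem values_fold (z : Int) (l : List Int) :
    l.foldl (fun b s => max b s) z = pvApp z 0 (pvFold some l) := by
  induction l generalizing z with
  | nil => rfl
  | cons x l ih =>
    rw [List.foldl_cons, ih, pvFold_cons, pvApp_max]

-- ===== VERDICT (by name: the statement is the Claim_ definition above) =====
theorem solution_spec : Claim_equal_solution := by
  intro ability _ _
  show solution ability = solution_alt ability
  have hA : solution ability =
      pvApp 0 0 (pvF ability ability.length ((ability.headD []).length)
        ((ability.headD []).length) 0 0) := by
    show (pvDfs ability ability.length ((ability.headD []).length)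
      ((ability.headD []).length) 0 0 (List.replicate ability.length false, 0)).2 = _
    rw [pvDfs_eq ability ability.length ((ability.headD []).length)
      ((ability.headD []).length) 0 0 (List.replicate ability.length false) 0
      (List.length_replicate)]
    rw [maskOf_replicate]
  obtain ⟨hbound, hnodup, hOE⟩ :=
    pvLayers ability ability.length ((ability.headD []).length)
      ((ability.headD []).length) le_rfl
  rw [Nat.sub_self] at hOE
  have hB : solution_alt ability =
      pvApp 0 0 (pvFold (pvH ability ability.length ((ability.headD []).length)
        ((List.range ((ability.headD []).length)).foldl
          (fun dp j => pvLayer ability ability.length j dp)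
          (PySem.Dict.empty.insert 0 0)) 0 ((ability.headD []).length))
        (List.range (2 ^ ability.length))) := by
    show ((List.range ((ability.headD []).length)).foldl
        (fun dp j => pvLayer ability ability.length j dp)
        (PySem.Dict.empty.insert 0 0)).values.foldl (fun best s => max best s) 0 = _
    rw [values_fold]
    congr 1
    rw [pvFold_items ability ability.length ((ability.headD []).length) _ 0
      ((ability.headD []).length) hnodup hbound]
    simp only [PySem.Dict.values]
    rw [pvFold_map_list]
    apply pvFold_congr
    intro p _
    conv_rhs => rw [pvF]
    simp
  rw [hA, hB, hOE]
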